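-- pv_equiv track=rewrite | github.com/bpimentel3/doe-toolkit | src/core/fractional_factorial.py | _simplify_word
-- ===== SOURCE A (Python) =====
-- def _simplify_word(word: str) -> str:
--     """
--     Simplify a generator word by removing pairs of identical letters.
--
--     In mod-2 algebra: A*A = I, A*B*A = B, etc.
--     """
--     # Count occurrences of each letter
--     counts = {}
--     for letter in word:
--         counts[letter] = counts.get(letter, 0) + 1
--
--     # Keep only letters with odd counts
--     result = ""
--     for letter in sorted(counts.keys()):
--         if counts[letter] % 2 == 1:
--             result += letter
--
--     return result
-- ===== SOURCE B (Python) =====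
-- def _simplify_word(word: str) -> str:
--     s = sorted(word)
--     n = len(s)
--     out = []
--     i = 0
--     while i < n:
--         j = i
--         while j < n and s[j] == s[i]:
--             j += 1
--         if (j - i) % 2 == 1:
--             out.append(s[i])
--         i = j
--     return "".join(out)
-- ===== Notes on version B (the rewrite author's own statement) =====
-- stated objective: alternative
-- what changed: Sorts the whole word first and then scans equal-letter runs once, emitting the letter of each odd-length run; no counting dictionary and no separate odd-count filtering pass over the keys.
import Mathlib
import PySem

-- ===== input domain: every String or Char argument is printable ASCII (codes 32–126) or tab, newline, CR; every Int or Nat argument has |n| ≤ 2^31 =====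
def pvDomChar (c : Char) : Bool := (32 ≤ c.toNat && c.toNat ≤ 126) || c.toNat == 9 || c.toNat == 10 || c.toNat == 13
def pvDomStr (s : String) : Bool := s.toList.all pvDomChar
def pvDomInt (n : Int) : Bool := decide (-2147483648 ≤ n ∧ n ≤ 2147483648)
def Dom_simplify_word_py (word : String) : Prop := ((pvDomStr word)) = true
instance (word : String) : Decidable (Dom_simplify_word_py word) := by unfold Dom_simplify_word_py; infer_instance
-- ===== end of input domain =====

-- B sorts the word and scans equal-letter runs once, emitting letters of odd-length runs; no count dict, no key-filter pass (alternative algorithm, similar cost).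


-- ===== PORT A =====
-- 'result += letter' is ported as a List Char accumulator, turned into a String at the end (exact).
def simplify_word_py (word : String) : String :=
  let counts : PySem.Dict Char Int :=
    word.toList.foldl (fun counts letter => counts.insert letter (counts.getD letter 0 + 1)) PySem.Dict.empty
  let result : List Char :=
    (PySem.List.sorted counts.keys (fun x => x) false).foldl
      (fun result letter => if PySem.Int.mod (counts.getD letter 0) 2 == 1 then result ++ [letter] else result)
      []
  String.mk result

-- ===== PORT B =====
-- inner while loop: 'while i < n and s[i] == c: run += 1; i += 1'; n = len(s) is inlined as s.length (the list is never mutated).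
def pvRunStep (s : List Char) (c : Char) (i run : Nat) : Nat × Nat :=
  if h : i < s.length ∧ s[i]? = some c then pvRunStep s c (i + 1) (run + 1) else (run, i)
termination_by s.length - i
decreasing_by exact Nat.sub_succ_lt_self _ _ h.1

-- the inner while loop never moves i backwards (needed for the outer loop's termination)
lemma pvRunStep_ge (s : List Char) (c : Char) : ∀ i run, i ≤ (pvRunStep s c i run).2 := by
  intro i run
  fun_induction pvRunStep s c i run with
  | case1 i run h ih => exact Nat.le_trans (Nat.le_succ i) ih
  | case2 i run h => exact Nat.le_refl i

-- outer while loop: 'while i < n: c = s[i]; (run, i) = inner; if run % 2 == 1: out.append(c)'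
def pvOuter (s : List Char) (i : Nat) (out : List Char) : List Char :=
  if h : i < s.length then
    let c := s.getD i default
    let p := pvRunStep s c i 0
    pvOuter s p.2 (if p.1 % 2 = 1 then out ++ [c] else out)
  else out
termination_by s.length - i
decreasing_by
  have h1 : s[i]? = some (s.getD i default) := by
    rw [List.getD_eq_getElem?_getD, List.getElem?_eq_getElem h]; rfl
  have h2 : pvRunStep s (s.getD i default) i 0 = pvRunStep s (s.getD i default) (i + 1) 1 := by
    rw [pvRunStep, dif_pos (And.intro h h1)]
  exact h2 ▸ Nat.sub_lt_sub_left h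
    (Nat.lt_of_lt_of_le (Nat.lt_succ_self i) (pvRunStep_ge s (s.getD i default) (i + 1) 1))

-- ''.join(out) is ported as String.mk (exact)
def simplify_word_py_alt (word : String) : String :=
  let s := PySem.List.sorted word.toList (fun x => x) false
  String.mk (pvOuter s 0 [])

-- ===== PRECONDITION & SPEC =====
def Spec_simplify_word_py (word : String) (out : String) : Prop := out = simplify_word_py_alt word
instance (word : String) (out : String) : Decidable (Spec_simplify_word_py word out) := by unfold Spec_simplify_word_py; infer_instance

-- ===== CLAIM (what is proved, stated in full; the proofs are below) =====
def Claim_equal_simplify_word_py : Prop := ∀ (word : String), Dom_simplify_word_py word → Spec_simplify_word_py word (simplify_word_py word)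

-- ===== LEMMAS AND PROOFS =====

-- abstract form of B's scan: odd-length runs of the (sorted) list
def oddsFrom : List Char → List Char
  | [] => []
  | c :: t =>
      (if ((t.takeWhile (· == c)).length + 1) % 2 = 1 then [c] else []) ++
        oddsFrom (t.dropWhile (· == c))
termination_by l => l.length
decreasing_by exact Nat.lt_succ_of_le (List.length_dropWhile_le _ _)

lemma oddsFrom_nil : oddsFrom [] = [] := by rw [oddsFrom]

lemma oddsFrom_cons (c : Char) (t : List Char) :
    oddsFrom (c :: t) =
      (if ((t.takeWhile (· == c)).length + 1) % 2 = 1 then [c] else []) ++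
        oddsFrom (t.dropWhile (· == c)) := by
  rw [oddsFrom]

lemma pvRunStep_eq (s : List Char) (c : Char) : ∀ i run, pvRunStep s c i run =
    (run + ((s.drop i).takeWhile (· == c)).length, i + ((s.drop i).takeWhile (· == c)).length) := by
  intro i run
  fun_induction pvRunStep s c i run with
  | case1 i run h ih =>
      obtain ⟨hlt, hget⟩ := h
      have hdrop : s.drop i = s[i] :: s.drop (i + 1) := List.drop_eq_getElem_cons hlt
      have hc : s[i] = c := by simp [List.getElem?_eq_getElem hlt] at hget; exact hget
      rw [ih, hdrop, hc]
      simp [List.takeWhile]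
      omega
  | case2 i run h =>
      by_cases hlt : i < s.length
      · have hget : s[i]? ≠ some c := fun hc => h ⟨hlt, hc⟩
        have hdrop : s.drop i = s[i] :: s.drop (i + 1) := List.drop_eq_getElem_cons hlt
        have hne : (s[i] == c) = false := by
          simp [List.getElem?_eq_getElem hlt] at hget
          simp [hget]
        rw [hdrop]
        simp [List.takeWhile, hne]
      · have : s.drop i = [] := List.drop_eq_nil_of_le (by omega)
        simp [this]

lemma dropWhile_eq_drop_len (p : Char → Bool) (t : List Char) :
    t.dropWhile p = t.drop (t.takeWhile p).length := by
  induction t with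
  | nil => simp
  | cons a u ih =>
      by_cases h : p a
      · simp [List.dropWhile, List.takeWhile, h, ih]
      · simp [List.dropWhile, List.takeWhile, h]

lemma pvOuter_eq (s : List Char) : ∀ i out, pvOuter s i out = out ++ oddsFrom (s.drop i) := by
  intro i out
  fun_induction pvOuter s i out with
  | case1 i out h c p ih =>
      simp only [dite_eq_ite] at ih
      have hdrop : List.drop i s = s[i] :: List.drop (i + 1) s := List.drop_eq_getElem_cons h
      have hc : c = s[i] := by
        simp [c, List.getD_eq_getElem?_getD, List.getElem?_eq_getElem h]
      have hp : p = ((List.takeWhile (fun x => x == s[i]) (List.drop (i + 1) s)).length + 1,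
                     i + ((List.takeWhile (fun x => x == s[i]) (List.drop (i + 1) s)).length + 1)) := by
        have h2 := pvRunStep_eq s c i 0
        rw [hdrop] at h2
        simp [List.takeWhile, hc] at h2
        simpa [p, hc] using h2
      rw [ih, hp]
      have hdw : (List.drop (i + 1) s).dropWhile (· == s[i]) =
          List.drop (i + ((List.takeWhile (fun x => x == s[i]) (List.drop (i + 1) s)).length + 1)) s := by
        rw [dropWhile_eq_drop_len, List.drop_drop]
        congr 1
        omega
      rw [hdrop, oddsFrom_cons, ← hdw]
      by_cases hodd : ((List.takeWhile (fun x => x == s[i]) (List.drop (i + 1) s)).length + 1) % 2 = 1 <;>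
        simp [hodd, hc]
  | case2 i out h =>
      have : s.drop i = [] := List.drop_eq_nil_of_le (by omega)
      simp [this, oddsFrom_nil]

-- every element of oddsFrom l is an element of l
lemma oddsFrom_subset : ∀ (l : List Char), ∀ x ∈ oddsFrom l, x ∈ l := by
  intro l
  fun_induction oddsFrom l with
  | case1 => simp [oddsFrom_nil]
  | case2 c t ih =>
      intro x hx
      rcases List.mem_append.mp hx with h | h
      · have : x = c := by split at h <;> simp_all
        simp [this]
      · have hxd := ih x h
        have : x ∈ t := List.dropWhile_sublist _ |>.mem hxd
        simp [this]

lemma dropWhile_head_false (p : Char → Bool) : ∀ (t : List Char) (b : Char) (u : List Char),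
    t.dropWhile p = b :: u → p b = false := by
  intro t
  induction t with
  | nil => intro b u h; simp at h
  | cons a r ih =>
      intro b u h
      by_cases hp : p a
      · rw [List.dropWhile_cons_of_pos hp] at h
        exact ih b u h
      · rw [List.dropWhile_cons_of_neg hp] at h
        cases h
        simpa using hp

-- in a ≤-sorted list c :: t, everything after the leading run of c is > c
lemma sorted_dropWhile_gt (c : Char) (t : List Char) (hp : (c :: t).Pairwise (· ≤ ·)) :
    ∀ x ∈ t.dropWhile (· == c), c < x := by
  intro x hx
  have hxt : x ∈ t := List.dropWhile_sublist _ |>.mem hx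
  have hle : c ≤ x := (List.pairwise_cons.mp hp).1 x hxt
  rcases lt_or_eq_of_le hle with h | h
  · exact h
  · exfalso
    cases hd : t.dropWhile (· == c) with
    | nil => simp [hd] at hx
    | cons b u =>
        have hbne : (b == c) = false := dropWhile_head_false _ t b u hd
        have hbt : b ∈ t := List.dropWhile_sublist _ |>.mem
          (by rw [hd]; exact List.mem_cons_self)
        have hcb : c ≤ b := (List.pairwise_cons.mp hp).1 b hbt
        have hdp : (t.dropWhile (· == c)).Pairwise (· ≤ ·) :=
          List.Pairwise.sublist (List.dropWhile_sublist _) (List.pairwise_cons.mp hp).2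
        rw [hd] at hdp hx
        rcases List.mem_cons.mp hx with rfl | hxu
        · simp_all
        · have hbx : b ≤ x := (List.pairwise_cons.mp hdp).1 x hxu
          have : b = c := le_antisymm (h ▸ hbx) hcb
          simp_all

lemma count_takeWhile_run (c : Char) (t : List Char) (x : Char) :
    (t.takeWhile (· == c)).count x = if x = c then (t.takeWhile (· == c)).length else 0 := by
  by_cases h : x = c
  · subst h
    rw [if_pos rfl, List.count_eq_length.mpr]
    intro b hb
    have := List.mem_takeWhile_imp hb
    simp at this; simp [this]
  · rw [if_neg h, List.count_eq_zero.mpr]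
    intro hx
    have := List.mem_takeWhile_imp hx
    simp at this; simp_all

-- membership in oddsFrom of a ≤-sorted list is exactly an odd count
lemma mem_oddsFrom : ∀ (n : Nat) (l : List Char), l.length ≤ n → l.Pairwise (· ≤ ·) →
    ∀ x, x ∈ oddsFrom l ↔ l.count x % 2 = 1 := by
  intro n
  induction n with
  | zero =>
      intro l hl _ x
      have : l = [] := List.eq_nil_of_length_eq_zero (by omega)
      subst this
      simp [oddsFrom_nil]
  | succ n ih =>
      intro l hl hp x
      cases l with
      | nil => simp [oddsFrom_nil]
      | cons c t =>
          have hdp : (t.dropWhile (· == c)).Pairwise (· ≤ ·) :=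
            List.Pairwise.sublist (List.dropWhile_sublist _) (List.pairwise_cons.mp hp).2
          have hgt := sorted_dropWhile_gt c t hp
          have hdl : (t.dropWhile (· == c)).length ≤ n := by
            have hlen := List.length_dropWhile_le (p := (· == c)) (l := t)
            simp at hl
            omega
          have hih := ih _ hdl hdp
          have hcount_t : t.count x = (if x = c then (t.takeWhile (· == c)).length else 0) +
              (t.dropWhile (· == c)).count x := by
            conv_lhs => rw [← List.takeWhile_append_dropWhile (p := (· == c)) (l := t)]
            rw [List.count_append, count_takeWhile_run]
          rw [oddsFrom_cons, List.mem_append]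
          by_cases hx : x = c
          · subst hx
            have hxd : x ∉ oddsFrom (t.dropWhile (· == x)) := fun hm =>
              absurd (hgt x (oddsFrom_subset _ x hm)) (lt_irrefl x)
            have hdc : (t.dropWhile (· == x)).count x = 0 := List.count_eq_zero.mpr fun hm =>
              absurd (hgt x hm) (lt_irrefl x)
            have hcc : (x :: t).count x = (t.takeWhile (· == x)).length + 1 := by
              rw [List.count_cons_self, hcount_t, if_pos rfl, hdc]
            rw [hcc]
            by_cases hcond : ((t.takeWhile (· == x)).length + 1) % 2 = 1
            · simp [hcond]
            · simp [hcond, hxd]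
          · have hcc : (c :: t).count x = (t.dropWhile (· == c)).count x := by
              simp [List.count_cons, hcount_t, hx]
              exact fun h => hx h.symm
            rw [hcc, ← hih x]
            have hxh : x ∉ (if ((t.takeWhile (· == c)).length + 1) % 2 = 1 then [c] else ([] : List Char)) := by
              split <;> simp [hx]
            simp [hxh]

lemma pairwise_oddsFrom : ∀ (n : Nat) (l : List Char), l.length ≤ n → l.Pairwise (· ≤ ·) →
    (oddsFrom l).Pairwise (· < ·) := by
  intro n
  induction n with
  | zero =>
      intro l hl _
      have : l = [] := List.eq_nil_of_length_eq_zero (by omega)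
      subst this
      simp [oddsFrom_nil]
  | succ n ih =>
      intro l hl hp
      cases l with
      | nil => simp [oddsFrom_nil]
      | cons c t =>
          have hdp : (t.dropWhile (· == c)).Pairwise (· ≤ ·) :=
            List.Pairwise.sublist (List.dropWhile_sublist _) (List.pairwise_cons.mp hp).2
          have hgt := sorted_dropWhile_gt c t hp
          have hdl : (t.dropWhile (· == c)).length ≤ n := by
            have hlen := List.length_dropWhile_le (p := (· == c)) (l := t)
            simp at hl
            omega
          rw [oddsFrom_cons, List.pairwise_append]
          refine ⟨?_, ih _ hdl hdp, ?_⟩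
          · split <;> simp
          · intro a ha b hb
            have hbc : c < b := hgt b (oddsFrom_subset _ b hb)
            have : a = c := by split at ha <;> simp_all
            simpa [this] using hbc

lemma eq_of_pairwise_lt_of_mem_iff (l₁ l₂ : List Char)
    (h₁ : l₁.Pairwise (· < ·)) (h₂ : l₂.Pairwise (· < ·))
    (hm : ∀ x, x ∈ l₁ ↔ x ∈ l₂) : l₁ = l₂ := by
  exact h₁.eq_of_mem_iff h₂ hm

lemma int_mod_count (n : Nat) : (PySem.Int.mod (n : Int) 2 == 1) = decide (¬ (n % 2 = 0)) := by
  simp only [PySem.Int.mod, Int.fmod_eq_emod]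
  rw [Bool.eq_iff_iff]
  simp only [beq_iff_eq, decide_eq_true_eq]
  omega

theorem simplify_word_py_eq (word : String) : simplify_word_py word = simplify_word_py_alt word := by
  unfold simplify_word_py simplify_word_py_alt
  simp only []
  set l := word.toList with hl
  rw [PySem.Dict.foldl_insert_getD_add_one_eq_counter]
  rw [PySem.List.foldl_append_ite_eq_filter
        (p := fun letter => PySem.Int.mod ((PySem.Dict.counter l).getD letter 0) 2 == 1)]
  rw [pvOuter_eq]
  simp only [List.drop_zero, List.nil_append]
  apply congrArg String.mk
  rw [PySem.Dict.keys_counter]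
  have hsp : (PySem.List.sorted l (fun x => x) false).Pairwise (· ≤ ·) := by
    simpa using PySem.List.sorted_pairwise (xs := l) (key := fun x => x)
  apply eq_of_pairwise_lt_of_mem_iff
  · exact (PySem.List.sorted_ofList_pairwise_lt (xs := l)).filter _
  · exact pairwise_oddsFrom (PySem.List.sorted l (fun x => x) false).length _ le_rfl hsp
  · intro x
    rw [mem_oddsFrom (PySem.List.sorted l (fun x => x) false).length _ le_rfl hsp x]
    rw [(PySem.List.sorted_perm l (fun x => x) false).count_eq]
    simp only [List.mem_filter, PySem.List.mem_sorted, PySem.Set.mem_ofList,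
      PySem.Dict.getD_counter, int_mod_count, decide_eq_true_eq]
    constructor
    · rintro ⟨-, h⟩
      omega
    · intro h
      have hmem : x ∈ l := by
        by_contra hc
        rw [List.count_eq_zero_of_not_mem hc] at h
        omega
      exact ⟨hmem, by omega⟩

-- ===== VERDICT (by name: the statement is the Claim_ definition above) =====
theorem simplify_word_py_spec : Claim_equal_simplify_word_py := by
  intro word _
  unfold Spec_simplify_word_py
  exact simplify_word_py_eq word
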